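-- pv_equiv track=rewrite | github.com/VladiSlave-Fesik/brotato_steam-guide | parse_titles.py | generate_guide_text
-- ===== SOURCE A (Python) =====
-- PREFIXES = {
--     'characters': 'c',
--     'weapons': 'w',
--     'items': 'i'
-- }
--
-- STEAM_ID_START = 40214553
--
-- EXCEPTION_NAMES = {'Pacifist', 'Cryptid', 'Masochist', 'Hatchet', 'SMG', 'Compass', 'Coral(DLC)', 'Greek Fire',
--                    'Little Muscley Dude', 'Lost Duck', 'Lucky Coin', 'Lure', 'Mastery', 'Medical Turret',
--                    'Metal Detector', 'Nail'}
--
-- def generate_guide_text(section, names):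
--     '''Formats extracted names with corresponding image references for the Steam guide.'''
--     prefix = PREFIXES[section]
--     lines = []
--     steam_id = STEAM_ID_START
--     steam_id_map = {}  # To store correct mapping of names to IDs
--
--     for i, name in enumerate(names):
--         img_filename = f'{prefix}_{i}.png'
--
--         steam_id_map[name] = steam_id
--
--         img_tag = f'[previewimg={steam_id};sizeFull,floatLeft;{img_filename}][/previewimg]'
--         lines.append(f'[h1] {name} [/h1]')
--         lines.append(img_tag)
--
--         if name in EXCEPTION_NAMES:
--             steam_id += 2
--         else:
--             steam_id += 1
--
--     return '\n'.join(lines)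
-- ===== SOURCE B (Python) =====
-- PREFIXES = {
--     'characters': 'c',
--     'weapons': 'w',
--     'items': 'i'
-- }
--
-- STEAM_ID_START = 40214553
--
-- EXCEPTION_NAMES = {'Pacifist', 'Cryptid', 'Masochist', 'Hatchet', 'SMG', 'Compass', 'Coral(DLC)', 'Greek Fire',
--                    'Little Muscley Dude', 'Lost Duck', 'Lucky Coin', 'Lure', 'Mastery', 'Medical Turret',
--                    'Metal Detector', 'Nail'}
--
-- def generate_guide_text(section, names):
--     '''Formats extracted names with corresponding image references for the Steam guide.'''
--     prefix = PREFIXES[section]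
--     # pass 1: per-name increment weights, then exclusive prefix sums = steam ids
--     weights = [2 if name in EXCEPTION_NAMES else 1 for name in names]
--     ids = []
--     acc = STEAM_ID_START
--     for w in weights:
--         ids.append(acc)
--         acc += w
--     # pass 2: pure formatting over the precomputed id table
--     return '\n'.join(
--         f'[h1] {name} [/h1]\n[previewimg={sid};sizeFull,floatLeft;{prefix}_{i}.png][/previewimg]'
--         for i, (name, sid) in enumerate(zip(names, ids))
--     )
-- ===== Notes on version B (the rewrite author's own statement) =====
-- stated objective: alternative
-- what changed: Replaces the single loop that interleaves id accumulation with line building (and a dead steam_id_map dict) by two passes: a precomputed exclusive-prefix-sum id table from per-name weights, then a pure formatting comprehension joined once.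
import Mathlib
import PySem

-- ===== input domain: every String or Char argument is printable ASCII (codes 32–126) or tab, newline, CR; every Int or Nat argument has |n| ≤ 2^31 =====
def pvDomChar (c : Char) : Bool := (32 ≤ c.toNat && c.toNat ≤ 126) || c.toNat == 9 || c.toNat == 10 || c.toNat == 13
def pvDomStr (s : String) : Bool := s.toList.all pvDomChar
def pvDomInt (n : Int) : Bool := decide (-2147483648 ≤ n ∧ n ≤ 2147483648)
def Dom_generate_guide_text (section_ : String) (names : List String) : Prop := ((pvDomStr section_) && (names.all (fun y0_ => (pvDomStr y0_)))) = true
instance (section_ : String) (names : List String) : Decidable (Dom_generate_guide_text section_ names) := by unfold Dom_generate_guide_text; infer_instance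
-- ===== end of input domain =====

-- B replaces A's single loop (running steam_id accumulator + dead steam_id_map dict +
-- incremental line list) by two passes: a precomputed exclusive-prefix-sum id table from
-- per-name weights, then a pure formatting pass over enumerate(zip(names, ids)).
-- Return-value equivalence on sections present in PREFIXES (A raises KeyError otherwise).

-- ===== PORT A =====
def pvPREFIXES : PySem.Dict String String :=
  PySem.Dict.ofList [("characters", "c"), ("weapons", "w"), ("items", "i")]

def pvEXCEPTION_NAMES : PySem.Set String :=
  PySem.Set.ofList ["Pacifist", "Cryptid", "Masochist", "Hatchet", "SMG", "Compass",
    "Coral(DLC)", "Greek Fire", "Little Muscley Dude", "Lost Duck", "Lucky Coin", "Lure",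
    "Mastery", "Medical Turret", "Metal Detector", "Nail"]

-- one iteration of A's for-loop; state = (lines, steam_id, steam_id_map)
def pvStepA (prefix_ : String) (st : List String × Int × PySem.Dict String Int)
    (p : Int × String) : List String × Int × PySem.Dict String Int :=
  let img_filename := prefix_ ++ "_" ++ PySem.Int.toStr p.1 ++ ".png"
  let steam_id_map := st.2.2.insert p.2 st.2.1
  let img_tag := "[previewimg=" ++ PySem.Int.toStr st.2.1 ++ ";sizeFull,floatLeft;"
      ++ img_filename ++ "][/previewimg]"
  let lines := st.1 ++ ["[h1] " ++ p.2 ++ " [/h1]", img_tag]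
  let steam_id := st.2.1 + (if PySem.Set.contains pvEXCEPTION_NAMES p.2 then 2 else 1)
  (lines, steam_id, steam_id_map)

def generate_guide_text (section_ : String) (names : List String) : String :=
  -- PREFIXES[section]: KeyError (none) is excluded by Pre_; the default is never reached there
  let prefix_ := (pvPREFIXES.get? section_).getD ""
  let res := (PySem.List.enumerate names).foldl (pvStepA prefix_)
      ([], 40214553, PySem.Dict.empty)
  PySem.Str.join "\n" res.1

-- ===== PORT B =====
def pvWeight (name : String) : Int :=
  if PySem.Set.contains pvEXCEPTION_NAMES name then 2 else 1

-- exclusive prefix sums of the weights, seeded at STEAM_ID_START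
def pvIdsStep (st : List Int × Int) (w : Int) : List Int × Int :=
  (st.1 ++ [st.2], st.2 + w)

def pvFmtB (prefix_ : String) (p : Int × String × Int) : String :=
  "[h1] " ++ p.2.1 ++ " [/h1]\n[previewimg=" ++ PySem.Int.toStr p.2.2
    ++ ";sizeFull,floatLeft;" ++ prefix_ ++ "_" ++ PySem.Int.toStr p.1 ++ ".png][/previewimg]"

def generate_guide_text_alt (section_ : String) (names : List String) : String :=
  let prefix_ := (pvPREFIXES.get? section_).getD ""
  let weights := names.map pvWeight
  let ids := (weights.foldl pvIdsStep ([], 40214553)).1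
  PySem.Str.join "\n"
    ((PySem.List.enumerate (names.zip ids)).map
      (fun p => pvFmtB prefix_ (p.1, p.2.1, p.2.2)))

-- ===== PRECONDITION & SPEC =====
-- Pre_ excludes exactly the sections not in PREFIXES, where the Python A raises KeyError.
def Pre_generate_guide_text (section_ : String) (names : List String) : Prop :=
  pvPREFIXES.contains section_ = true
instance (section_ : String) (names : List String) : Decidable (Pre_generate_guide_text section_ names) := by
  unfold Pre_generate_guide_text; infer_instance

def pvWitness_generate_guide_text : String × List String := ("items", ["Nail", "a"])

def Spec_generate_guide_text (section_ : String) (names : List String) (out : String) : Prop := out = generate_guide_text_alt section_ names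
instance (section_ : String) (names : List String) (out : String) : Decidable (Spec_generate_guide_text section_ names out) := by unfold Spec_generate_guide_text; infer_instance

-- ===== CLAIM (what is proved, stated in full; the proofs are below) =====
def Claim_equal_generate_guide_text : Prop := ∀ (section_ : String) (names : List String), Dom_generate_guide_text section_ names → Pre_generate_guide_text section_ names → Spec_generate_guide_text section_ names (generate_guide_text section_ names)

-- ===== LEMMAS AND PROOFS =====

-- the two line fragments A produces for one (index, name, steam_id) triple
def pvH1 (name : String) : String := "[h1] " ++ name ++ " [/h1]"
def pvTag (prefix_ : String) (i : Int) (sid : Int) : String :=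
  "[previewimg=" ++ PySem.Int.toStr sid ++ ";sizeFull,floatLeft;"
    ++ (prefix_ ++ "_" ++ PySem.Int.toStr i ++ ".png") ++ "][/previewimg]"

-- each enumerated name annotated with its running steam_id
def pvAnnot : List (Int × String) → Int → List (Int × String × Int)
  | [], _ => []
  | (i, n) :: rest, s => (i, n, s) :: pvAnnot rest (s + pvWeight n)

theorem pvFoldA_lines (prefix_ : String) (l : List (Int × String)) :
    ∀ (acc : List String) (s : Int) (d : PySem.Dict String Int),
      (l.foldl (pvStepA prefix_) (acc, s, d)).1
        = acc ++ (pvAnnot l s).flatMap (fun t => [pvH1 t.2.1, pvTag prefix_ t.1 t.2.2]) := by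
  induction l with
  | nil => intro acc s d; simp [pvAnnot]
  | cons p rest ih =>
      intro acc s d
      obtain ⟨i, n⟩ := p
      simp only [List.foldl_cons, pvStepA, pvAnnot, List.flatMap_cons]
      rw [ih]
      simp [pvH1, pvTag, pvWeight, List.append_assoc]

-- the exclusive prefix-sum list B precomputes
def pvIdsOf : List Int → Int → List Int
  | [], _ => []
  | w :: rest, s => s :: pvIdsOf rest (s + w)

theorem pvFoldIds (ws : List Int) :
    ∀ (acc : List Int) (s : Int),
      (ws.foldl pvIdsStep (acc, s)).1 = acc ++ pvIdsOf ws s := by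
  induction ws with
  | nil => intro acc s; simp [pvIdsOf]
  | cons w rest ih =>
      intro acc s
      simp only [List.foldl_cons, pvIdsStep]
      rw [ih]
      simp [pvIdsOf]

theorem pvZipIds (names : List String) :
    ∀ (s : Int) (k : Int),
      PySem.List.enumerate (names.zip (pvIdsOf (names.map pvWeight) s)) k
        = (pvAnnot (PySem.List.enumerate names k) s).map (fun t => (t.1, t.2.1, t.2.2)) := by
  induction names with
  | nil => intro s k; simp [pvIdsOf, PySem.List.enumerate_nil, pvAnnot]
  | cons n rest ih =>
      intro s k
      simp only [List.map_cons, pvIdsOf, List.zip_cons_cons, PySem.List.enumerate_cons,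
        pvAnnot, List.map_cons]
      rw [ih]

-- join with a separator when the tail is nonempty
theorem pvCharsJoinCons (sep a : List Char) (L : List (List Char)) (h : L ≠ []) :
    PySem.Chars.join sep (a :: L) = a ++ sep ++ PySem.Chars.join sep L := by
  cases L with
  | nil => exact absurd rfl h
  | cons b r => exact PySem.Chars.join_cons_cons sep a b r

theorem pvCharsJoinPair {α : Type} (sep : List Char) (F G : α → List Char) (l : List α) :
    PySem.Chars.join sep (l.flatMap (fun x => [F x, G x]))
      = PySem.Chars.join sep (l.map (fun x => F x ++ sep ++ G x)) := by
  induction l with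
  | nil => rfl
  | cons x rest ih =>
      simp only [List.flatMap_cons, List.map_cons, List.cons_append, List.nil_append]
      cases rest with
      | nil =>
          simp [PySem.Chars.join_cons_cons, PySem.Chars.join_singleton, List.append_assoc]
      | cons y r =>
          have h1 : (y :: r).flatMap (fun x => [F x, G x]) ≠ [] := by simp
          have h2 : (y :: r).map (fun x => F x ++ sep ++ G x) ≠ [] := by simp
          rw [PySem.Chars.join_cons_cons, pvCharsJoinCons _ _ _ h1, ih,
            pvCharsJoinCons _ _ _ h2]
          simp [List.append_assoc]

-- join with '\n' of A's interleaved pair list = join of B's combined one-string-per-name list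
theorem pvJoinPair {α : Type} (f g : α → String) (l : List α) :
    PySem.Str.join "\n" (l.flatMap (fun x => [f x, g x]))
      = PySem.Str.join "\n" (l.map (fun x => f x ++ "\n" ++ g x)) := by
  apply String.toList_inj.mp
  simp only [PySem.Str.toList_join]
  rw [show (l.flatMap fun x => [f x, g x]).map String.toList
        = l.flatMap (fun x => [(f x).toList, (g x).toList]) from by
      simp [List.map_flatMap],
    show (l.map fun x => f x ++ "\n" ++ g x).map String.toList
        = l.map (fun x => (f x).toList ++ "\n".toList ++ (g x).toList) from by
      simp [List.map_map]]
  exact pvCharsJoinPair _ _ _ l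

-- B's per-element string is A's two fragments joined by one '\n'
theorem pvFmtB_eq (prefix_ : String) (t : Int × String × Int) :
    pvFmtB prefix_ (t.1, t.2.1, t.2.2) = pvH1 t.2.1 ++ "\n" ++ pvTag prefix_ t.1 t.2.2 := by
  apply String.toList_inj.mp
  simp [pvFmtB, pvH1, pvTag]

-- ===== VERDICT (by name: the statement is the Claim_ definition above) =====
theorem generate_guide_text_spec : Claim_equal_generate_guide_text := by
  intro section_ names _ _
  unfold Spec_generate_guide_text generate_guide_text generate_guide_text_alt
  dsimp only
  rw [pvFoldA_lines, pvFoldIds, List.nil_append, List.nil_append, pvZipIds, List.map_map]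
  have hmap : ∀ (l : List (Int × String × Int)),
      l.map ((fun p => pvFmtB ((pvPREFIXES.get? section_).getD "") (p.1, p.2.1, p.2.2))
          ∘ fun t => (t.1, t.2.1, t.2.2))
        = l.map (fun t => pvH1 t.2.1 ++ "\n"
            ++ pvTag ((pvPREFIXES.get? section_).getD "") t.1 t.2.2) := by
    intro l
    apply List.map_congr_left
    intro t _
    simp only [Function.comp_apply]
    exact pvFmtB_eq _ t
  rw [hmap]
  exact pvJoinPair _ _ _
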